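-- pv_equiv track=rewrite | github.com/zigaf/context-graph | scripts/context_graph_core.py | marker_conflicts
-- ===== SOURCE A (Python) =====
-- from typing import Any, Callable
--
-- def marker_conflicts(records: list[dict[str, Any]]) -> dict[str, list[str]]:
--     conflicts: dict[str, list[str]] = {}
--     keys = {key for record in records for key in record.get("markers", {}).keys()}
--     for key in sorted(keys):
--         values = sorted({str(record.get("markers", {}).get(key)) for record in records if record.get("markers", {}).get(key)})
--         if len(values) > 1:
--             conflicts[key] = values
--     return conflicts
-- ===== SOURCE B (Python) =====
-- def marker_conflicts(records: list[dict[str, dict[str, str]]]) -> dict[str, list[str]]: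
--     # Single pass over all records builds a key -> set-of-values index,
--     # instead of rescanning every record once per distinct key.
--     index: dict[str, set] = {}
--     for record in records:
--         for key, value in record.get("markers", {}).items():
--             if value:
--                 index.setdefault(key, set()).add(str(value))
--     conflicts: dict[str, list[str]] = {}
--     for key in sorted(index):
--         values = sorted(index[key])
--         if len(values) > 1:
--             conflicts[key] = values
--     return conflicts
-- ===== Notes on version B (the rewrite author's own statement) =====
-- stated objective: alternative
-- what changed: Instead of rescanning the whole record list once per distinct key, B builds a key -> set-of-values index in a single pass over all records' markers and then emits the sorted keys whose value set has more than one element.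
import Mathlib
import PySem

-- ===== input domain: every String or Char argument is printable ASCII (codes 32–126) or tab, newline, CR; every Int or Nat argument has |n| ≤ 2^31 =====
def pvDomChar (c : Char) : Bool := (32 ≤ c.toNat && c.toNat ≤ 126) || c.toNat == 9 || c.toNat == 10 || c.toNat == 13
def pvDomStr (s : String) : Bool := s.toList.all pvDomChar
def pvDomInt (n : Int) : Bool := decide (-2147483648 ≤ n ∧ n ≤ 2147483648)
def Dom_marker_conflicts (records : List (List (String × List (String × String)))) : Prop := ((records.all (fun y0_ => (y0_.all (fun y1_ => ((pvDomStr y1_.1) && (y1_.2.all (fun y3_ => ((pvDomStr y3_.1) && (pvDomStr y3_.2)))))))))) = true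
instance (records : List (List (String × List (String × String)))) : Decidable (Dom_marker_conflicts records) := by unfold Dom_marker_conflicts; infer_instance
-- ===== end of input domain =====

-- B replaces A's per-key rescan of all records by a single-pass key->value-set index; same return value.


-- ===== PORT A =====
-- record.get("markers", {}) as a dict (dicts arrive as association lists; Dict.ofList = python dict(pairs))
def mcMarkers (record : List (String × List (String × String))) : PySem.Dict String String :=
  PySem.Dict.ofList ((PySem.Dict.ofList record).getD "markers" [])

-- str(v) on a string is the string itself; 'if record.get(...).get(key)' is truthiness of an
-- Optional[str] (None and "" falsy), ported as getD key "" ≠ "".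
def marker_conflicts (records : List (List (String × List (String × String)))) : List (String × List String) :=
  let keys : PySem.Set String :=
    PySem.Set.ofList (records.flatMap (fun record => (mcMarkers record).keys))
  ((PySem.List.sorted keys (fun k => k)).foldl
    (fun conflicts key =>
      let values := PySem.List.sorted
        (PySem.Set.ofList ((records.filter
            (fun record => (mcMarkers record).getD key "" ≠ "")).map
            (fun record => (mcMarkers record).getD key ""))) (fun v => v)
      if values.length > 1 then conflicts.insert key values else conflicts)
    PySem.Dict.empty).items

-- ===== PORT B =====
def marker_conflicts_alt (records : List (List (String × List (String × String)))) : List (String × List String) :=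
  let index : PySem.Dict String (PySem.Set String) :=
    records.foldl
      (fun idx record =>
        ((PySem.Dict.ofList ((PySem.Dict.ofList record).getD "markers" [])).items).foldl
          (fun idx kv =>
            if kv.2 ≠ "" then
              idx.insert kv.1 (PySem.Set.add (idx.getD kv.1 PySem.Set.empty) kv.2)
            else idx)
          idx)
      PySem.Dict.empty
  ((PySem.List.sorted index.keys (fun k => k)).foldl
    (fun conflicts key =>
      let values := PySem.List.sorted (index.getD key PySem.Set.empty) (fun v => v)
      if values.length > 1 then conflicts.insert key values else conflicts)
    PySem.Dict.empty).items

-- ===== PRECONDITION & SPEC =====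
def Spec_marker_conflicts (records : List (List (String × List (String × String)))) (out : List (String × List String)) : Prop := out = marker_conflicts_alt records
instance (records : List (List (String × List (String × String)))) (out : List (String × List String)) : Decidable (Spec_marker_conflicts records out) := by unfold Spec_marker_conflicts; infer_instance

-- ===== CLAIM (what is proved, stated in full; the proofs are below) =====
def Claim_equal_marker_conflicts : Prop := ∀ (records : List (List (String × List (String × String)))), Dom_marker_conflicts records → Spec_marker_conflicts records (marker_conflicts records)

-- ===== LEMMAS AND PROOFS =====

-- the truthy values a key takes across the records, in record order (A's comprehension body)
def mcVals (records : List (List (String × List (String × String)))) (key : String) : List String :=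
  (records.filter (fun record => decide ((mcMarkers record).getD key "" ≠ ""))).map
    (fun record => (mcMarkers record).getD key "")

-- A's 'values' for a key: the sorted distinct truthy values
def mcV (records : List (List (String × List (String × String)))) (key : String) : List String :=
  PySem.List.sorted (PySem.Set.ofList (mcVals records key)) (fun v => v)

-- all (key, value) marker pairs, flattened over the records (B's iteration space)
def mcPairs (records : List (List (String × List (String × String)))) : List (String × String) :=
  records.flatMap (fun r => (mcMarkers r).items)

lemma mc_foldl_flatMap {α β γ : Type} (g : α → List β) (f : γ → β → γ) (l : List α) (init : γ) :
    l.foldl (fun acc x => (g x).foldl f acc) init = (l.flatMap g).foldl f init := by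
  induction l generalizing init with
  | nil => rfl
  | cons a t ih => simp [List.foldl_append, ih]

lemma mc_flatMap_ite {α β : Type} (p : α → Prop) [DecidablePred p] (f : α → β) (l : List α) :
    l.flatMap (fun x => if p x then [f x] else []) = (l.filter (fun x => decide (p x))).map f := by
  induction l with
  | nil => rfl
  | cons a t ih => by_cases h : p a <;> simp [List.filter_cons, h, ih]

lemma mc_list_filter (k : String) (l : List (String × String)) (h : (l.map Prod.fst).Nodup) :
    (l.filter (fun kv => (kv.1 == k) && decide (kv.2 ≠ ""))).map Prod.snd
      = (fun o => if o.getD "" ≠ "" then [o.getD ""] else [])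
          (Option.map Prod.snd (l.find? (fun p => p.1 == k))) := by
  induction l with
  | nil => simp
  | cons a t ih =>
    simp only [List.map_cons, List.nodup_cons] at h
    by_cases hk : a.1 = k
    · have hnin : ∀ kv ∈ t, kv.1 ≠ k := by
        intro kv hkv heq
        exact h.1 (hk ▸ heq ▸ List.mem_map_of_mem hkv)
      have hrest : t.filter (fun kv => (kv.1 == k) && decide (kv.2 ≠ "")) = [] := by
        rw [List.filter_eq_nil_iff]
        intro kv hkv
        simp [hnin kv hkv]
      by_cases hv : a.2 = "" <;>
        simp [List.filter_cons, List.find?_cons, hk, hv, hrest] <;>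
        exact fun a' b' hm heq => absurd heq (hnin (a', b') hm)
    · have hb : (a.1 == k) = false := by simp [hk]
      simpa [List.filter_cons, List.find?_cons, hb, hk] using ih h.2

lemma mc_pairs_vals (records : List (List (String × List (String × String)))) (k : String) :
    ((mcPairs records).filter (fun kv => (kv.1 == k) && decide (kv.2 ≠ ""))).map Prod.snd
      = mcVals records k := by
  unfold mcPairs
  rw [List.filter_flatMap, List.map_flatMap]
  have hper : ∀ r : List (String × List (String × String)),
      (((mcMarkers r).items.filter (fun kv => (kv.1 == k) && decide (kv.2 ≠ ""))).map Prod.snd)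
        = if (mcMarkers r).getD k "" ≠ "" then [(mcMarkers r).getD k ""] else [] := by
    intro r
    have := mc_list_filter k (mcMarkers r).items (PySem.Dict.nodup_keys_ofList _)
    simpa [PySem.Dict.getD, PySem.Dict.get?] using this
  calc (records.flatMap fun r =>
          ((mcMarkers r).items.filter (fun kv => (kv.1 == k) && decide (kv.2 ≠ ""))).map Prod.snd)
      = records.flatMap (fun r =>
          if (mcMarkers r).getD k "" ≠ "" then [(mcMarkers r).getD k ""] else []) := by
        simp only [hper]
    _ = mcVals records k := mc_flatMap_ite _ _ _

lemma mc_getD_fold (k : String) (pairs : List (String × String)) :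
    ∀ (idx : PySem.Dict String (PySem.Set String)),
    (pairs.foldl (fun idx kv =>
        if kv.2 ≠ "" then idx.insert kv.1 (PySem.Set.add (idx.getD kv.1 PySem.Set.empty) kv.2)
        else idx) idx).getD k PySem.Set.empty
      = ((pairs.filter (fun kv => (kv.1 == k) && decide (kv.2 ≠ ""))).map Prod.snd).foldl
          PySem.Set.add (idx.getD k PySem.Set.empty) := by
  induction pairs with
  | nil => intro idx; rfl
  | cons a t ih =>
    intro idx
    rw [List.foldl_cons, List.filter_cons]
    by_cases hv : a.2 = ""
    · rw [if_neg (show ¬ (a.2 ≠ "") from fun hc => hc hv)]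
      rw [if_neg (show ¬ (((a.1 == k) && decide (a.2 ≠ "")) = true) by simp [hv])]
      exact ih idx
    · rw [if_pos hv]
      by_cases hk : a.1 = k
      · have hb : ((a.1 == k) && decide (a.2 ≠ "")) = true := by simp [hk, hv]
        rw [if_pos hb, ih]
        have : (idx.insert a.1 (PySem.Set.add (idx.getD a.1 PySem.Set.empty) a.2)).getD k PySem.Set.empty
            = PySem.Set.add (idx.getD k PySem.Set.empty) a.2 := by
          rw [PySem.Dict.getD_insert]
          rw [if_pos hk.symm, hk]
        rw [this]
        simp
      · rw [if_neg (show ¬ (((a.1 == k) && decide (a.2 ≠ "")) = true) by simp [hk]), ih]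
        have : (idx.insert a.1 (PySem.Set.add (idx.getD a.1 PySem.Set.empty) a.2)).getD k PySem.Set.empty
            = idx.getD k PySem.Set.empty := by
          rw [PySem.Dict.getD_insert, if_neg (fun hc => hk hc.symm)]
        rw [this]

lemma mc_keys_insert (d : PySem.Dict String (PySem.Set String)) (k : String) (v : PySem.Set String) :
    (d.insert k v).keys = PySem.Set.add d.keys k := by
  by_cases h : d.contains k = true
  · rw [PySem.Dict.keys_insert_of_contains _ _ h,
      PySem.Set.add_of_mem ((PySem.Dict.contains_iff_mem_keys _ _).mp h)]
  · have h' : d.contains k = false := by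
      cases hc : d.contains k
      · rfl
      · exact absurd hc h
    rw [PySem.Dict.keys_insert_of_not_contains _ _ h',
      PySem.Set.add_of_not_mem]
    intro hc
    exact h ((PySem.Dict.contains_iff_mem_keys _ _).mpr hc)

lemma mc_keys_fold (pairs : List (String × String)) :
    ∀ (idx : PySem.Dict String (PySem.Set String)),
    (pairs.foldl (fun idx kv =>
        if kv.2 ≠ "" then idx.insert kv.1 (PySem.Set.add (idx.getD kv.1 PySem.Set.empty) kv.2)
        else idx) idx).keys
      = PySem.Set.update idx.keys ((pairs.filter (fun kv => decide (kv.2 ≠ ""))).map Prod.fst) := by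
  induction pairs with
  | nil => intro idx; simp [PySem.Set.update]
  | cons a t ih =>
    intro idx
    rw [List.foldl_cons, List.filter_cons]
    by_cases hv : a.2 = ""
    · rw [if_neg (show ¬ (a.2 ≠ "") from fun hc => hc hv)]
      rw [if_neg (show ¬ ((decide (a.2 ≠ "")) = true) by simp [hv])]
      exact ih idx
    · rw [if_pos hv]
      have hb : (decide (a.2 ≠ "")) = true := by simp [hv]
      rw [if_pos hb, ih]
      simp only [List.map_cons]
      rw [PySem.Set.update_cons, mc_keys_insert]

lemma mc_out_loop (V : String → List String) (ks : List String) :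
    ∀ (d : PySem.Dict String (List String)), ks.Nodup → (∀ k ∈ ks, d.contains k = false) →
    (ks.foldl (fun conflicts key =>
        if (V key).length > 1 then conflicts.insert key (V key) else conflicts) d).items
      = d.items ++ (ks.filter (fun k => decide ((V k).length > 1))).map (fun k => (k, V k)) := by
  induction ks with
  | nil => intro d _ _; simp
  | cons k t ih =>
    intro d hnd hf
    simp only [List.nodup_cons] at hnd
    rw [List.foldl_cons, List.filter_cons]
    by_cases hP : (V k).length > 1
    · rw [if_pos hP]
      have hcont : d.contains k = false := hf k (List.mem_cons_self)
      have hfresh : ∀ k' ∈ t, (d.insert k (V k)).contains k' = false := by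
        intro k' hk'
        rw [PySem.Dict.contains_insert]
        have h1 : (k' == k) = false := by
          simp only [beq_eq_false_iff_ne, ne_eq]
          intro hc; exact hnd.1 (hc ▸ hk')
        rw [h1, hf k' (List.mem_cons_of_mem _ hk')]
        rfl
      rw [ih (d.insert k (V k)) hnd.2 hfresh,
        PySem.Dict.items_insert_of_not_contains _ _ hcont]
      have hb : (decide ((V k).length > 1)) = true := by simp [hP]
      rw [if_pos hb]
      simp
    · rw [if_neg hP]
      rw [if_neg (show ¬ ((decide ((V k).length > 1)) = true) by simp [hP])]
      exact ih d hnd.2 (fun k' h => hf k' (List.mem_cons_of_mem _ h))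

lemma mc_pairwise_ext (l1 l2 : List String)
    (h1 : l1.Pairwise (· < ·)) (h2 : l2.Pairwise (· < ·))
    (hm : ∀ x, x ∈ l1 ↔ x ∈ l2) : l1 = l2 := by
  have n1 : l1.Nodup := h1.imp (fun h => ne_of_lt h)
  have n2 : l2.Nodup := h2.imp (fun h => ne_of_lt h)
  have hp : l1.Perm l2 := (List.perm_ext_iff_of_nodup n1 n2).mpr hm
  exact hp.eq_of_pairwise (fun a b _ _ hab hba => le_antisymm hab hba)
    (h1.imp le_of_lt) (h2.imp le_of_lt)

lemma mc_P_ne_nil (records : List (List (String × List (String × String)))) (k : String)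
    (h : (mcV records k).length > 1) : mcVals records k ≠ [] := by
  intro hnil
  rw [mcV, hnil] at h
  exact absurd h (by decide)

lemma mc_mem_keys (records : List (List (String × List (String × String)))) (k : String)
    (h : mcVals records k ≠ []) : k ∈ records.flatMap (fun r => (mcMarkers r).keys) := by
  unfold mcVals at h
  have hne : (records.filter (fun record => decide ((mcMarkers record).getD k "" ≠ ""))) ≠ [] := by
    intro hc; rw [hc] at h; exact h rfl
  obtain ⟨r, hr⟩ := List.exists_mem_of_ne_nil _ hne
  rw [List.mem_filter] at hr
  obtain ⟨hrmem, hrget⟩ := hr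
  have hget : (mcMarkers r).getD k "" ≠ "" := by simpa using hrget
  have hsome : ∃ v, (mcMarkers r).get? k = some v := by
    cases hq : (mcMarkers r).get? k with
    | none => exact absurd (by simp [PySem.Dict.getD, hq]) hget
    | some v => exact ⟨v, rfl⟩
  obtain ⟨v, hv⟩ := hsome
  have hcont : (mcMarkers r).contains k = true := by
    rw [PySem.Dict.contains_eq_isSome_get?, hv]
    rfl
  exact List.mem_flatMap.mpr ⟨r, hrmem, (PySem.Dict.contains_iff_mem_keys _ _).mp hcont⟩

-- B's key list: the first components of the truthy pairs
lemma mc_memB (records : List (List (String × List (String × String)))) (k : String) :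
    k ∈ ((mcPairs records).filter (fun kv => decide (kv.2 ≠ ""))).map Prod.fst
      ↔ mcVals records k ≠ [] := by
  rw [← mc_pairs_vals records k]
  constructor
  · intro hk
    obtain ⟨kv, hkv, hfst⟩ := List.mem_map.mp hk
    rw [List.mem_filter] at hkv
    have hmem : kv ∈ (mcPairs records).filter (fun kv => (kv.1 == k) && decide (kv.2 ≠ "")) := by
      rw [List.mem_filter]
      refine ⟨hkv.1, ?_⟩
      simp only [Bool.and_eq_true]
      exact ⟨by simp [hfst], hkv.2⟩
    intro hc
    have : kv.2 ∈ (((mcPairs records).filter (fun kv => (kv.1 == k) && decide (kv.2 ≠ ""))).map Prod.snd) :=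
      List.mem_map_of_mem hmem
    rw [hc] at this
    exact absurd this List.not_mem_nil
  · intro h
    have hne : ((mcPairs records).filter (fun kv => (kv.1 == k) && decide (kv.2 ≠ ""))) ≠ [] := by
      intro hc; rw [hc] at h; exact h rfl
    obtain ⟨kv, hkv⟩ := List.exists_mem_of_ne_nil _ hne
    rw [List.mem_filter, Bool.and_eq_true] at hkv
    refine List.mem_map.mpr ⟨kv, List.mem_filter.mpr ⟨hkv.1, hkv.2.2⟩, by simpa using hkv.2.1⟩

lemma mc_A_eq (records : List (List (String × List (String × String)))) :
    marker_conflicts records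
      = ((PySem.List.sorted (PySem.Set.ofList (records.flatMap (fun r => (mcMarkers r).keys))) (fun k => k)).filter
          (fun k => decide ((mcV records k).length > 1))).map (fun k => (k, mcV records k)) := by
  simp only [marker_conflicts]
  rw [mc_out_loop
      (fun key => PySem.List.sorted
        (PySem.Set.ofList ((records.filter
            (fun record => decide ((mcMarkers record).getD key "" ≠ ""))).map
            (fun record => (mcMarkers record).getD key ""))) (fun v => v))
      _ PySem.Dict.empty
      ((PySem.List.sorted_ofList_pairwise_lt _).imp (fun h => ne_of_lt h))
      (fun k _ => PySem.Dict.contains_empty _)]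
  rfl

lemma mc_B_eq (records : List (List (String × List (String × String)))) :
    marker_conflicts_alt records
      = ((PySem.List.sorted (PySem.Set.ofList (((mcPairs records).filter (fun kv => decide (kv.2 ≠ ""))).map Prod.fst)) (fun k => k)).filter
          (fun k => decide ((mcV records k).length > 1))).map (fun k => (k, mcV records k)) := by
  simp only [marker_conflicts_alt]
  rw [mc_foldl_flatMap]
  rw [show (records.flatMap fun record =>
        (PySem.Dict.ofList ((PySem.Dict.ofList record).getD "markers" [])).items)
      = mcPairs records from rfl]
  rw [mc_keys_fold (mcPairs records) PySem.Dict.empty]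
  rw [show (PySem.Dict.empty : PySem.Dict String (PySem.Set String)).keys = [] from rfl]
  rw [show PySem.Set.update ([] : List String)
        (((mcPairs records).filter (fun kv => decide (kv.2 ≠ ""))).map Prod.fst)
      = PySem.Set.ofList (((mcPairs records).filter (fun kv => decide (kv.2 ≠ ""))).map Prod.fst)
    from PySem.Set.update_nil_left _]
  have hgetD : ∀ k, ((mcPairs records).foldl (fun idx kv =>
        if kv.2 ≠ "" then idx.insert kv.1 (PySem.Set.add (idx.getD kv.1 PySem.Set.empty) kv.2)
        else idx) PySem.Dict.empty).getD k PySem.Set.empty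
      = PySem.Set.ofList (mcVals records k) := by
    intro k
    rw [mc_getD_fold k (mcPairs records) PySem.Dict.empty]
    rw [mc_pairs_vals records k]
    rw [show (PySem.Dict.empty : PySem.Dict String (PySem.Set String)).getD k PySem.Set.empty
        = ([] : PySem.Set String) from rfl]
    rw [PySem.Set.ofList_eq_foldl]
  rw [mc_out_loop
      (fun key => PySem.List.sorted
        (((mcPairs records).foldl (fun idx kv =>
            if kv.2 ≠ "" then idx.insert kv.1 (PySem.Set.add (idx.getD kv.1 PySem.Set.empty) kv.2)
            else idx) PySem.Dict.empty).getD key PySem.Set.empty) (fun v => v))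
      _ PySem.Dict.empty
      ((PySem.List.sorted_ofList_pairwise_lt _).imp (fun h => ne_of_lt h))
      (fun k _ => PySem.Dict.contains_empty _)]
  have hV : ∀ k, PySem.List.sorted (((mcPairs records).foldl (fun idx kv =>
        if kv.2 ≠ "" then idx.insert kv.1 (PySem.Set.add (idx.getD kv.1 PySem.Set.empty) kv.2)
        else idx) PySem.Dict.empty).getD k PySem.Set.empty) (fun v => v)
      = mcV records k := by
    intro k; rw [hgetD k]; rfl
  rw [show (PySem.Dict.empty : PySem.Dict String (List String)).items = [] from rfl,
    List.nil_append]
  rw [List.filter_congr (fun x _ => by rw [hV x])]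
  exact List.map_congr_left (fun x _ => by simp only [hV])

lemma mc_filters_eq (records : List (List (String × List (String × String)))) :
    ((PySem.List.sorted (PySem.Set.ofList (records.flatMap (fun r => (mcMarkers r).keys))) (fun k => k)).filter
        (fun k => decide ((mcV records k).length > 1)))
      = ((PySem.List.sorted (PySem.Set.ofList (((mcPairs records).filter (fun kv => decide (kv.2 ≠ ""))).map Prod.fst)) (fun k => k)).filter
        (fun k => decide ((mcV records k).length > 1))) := by
  apply mc_pairwise_ext
  · exact (PySem.List.sorted_ofList_pairwise_lt _).filter _
  · exact (PySem.List.sorted_ofList_pairwise_lt _).filter _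
  · intro x
    simp only [List.mem_filter, PySem.List.mem_sorted, PySem.Set.mem_ofList, decide_eq_true_eq]
    constructor
    · rintro ⟨-, hP⟩
      exact ⟨(mc_memB records x).mpr (mc_P_ne_nil records x hP), hP⟩
    · rintro ⟨hB, hP⟩
      exact ⟨mc_mem_keys records x ((mc_memB records x).mp hB), hP⟩

-- ===== VERDICT (by name: the statement is the Claim_ definition above) =====
theorem marker_conflicts_spec : Claim_equal_marker_conflicts := by
  intro records _
  show marker_conflicts records = marker_conflicts_alt records
  rw [mc_A_eq, mc_B_eq, mc_filters_eq]
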